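-- pv_equiv track=rewrite | github.com/mletunenko/epam_homework | homework7/task02.py | backspace
-- ===== SOURCE A (Python) =====
-- def backspace(string: str):
--     back = 0
--     result = []
--     for symbol in string[::-1]:
--         if symbol == '#':
--             back += 1
--         else:
--             if not back:
--                 result.append(symbol)
--             else:
--                 back -= 1
--     return result
-- ===== SOURCE B (Python) =====
-- def backspace(string: str):
--     stack = []
--     for ch in string:
--         if ch == '#':
--             if stack:
--                 stack.pop()
--         else:
--             stack.append(ch)
--     return stack[::-1]
-- ===== Notes on version B (the rewrite author's own statement) =====
-- stated objective: alternative
-- what changed: Replaces the backward scan with a pending-deletion counter by a single forward pass over the string maintaining an explicit stack (push on a character, pop on '#'), reversing the stack at the end.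
import Mathlib
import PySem

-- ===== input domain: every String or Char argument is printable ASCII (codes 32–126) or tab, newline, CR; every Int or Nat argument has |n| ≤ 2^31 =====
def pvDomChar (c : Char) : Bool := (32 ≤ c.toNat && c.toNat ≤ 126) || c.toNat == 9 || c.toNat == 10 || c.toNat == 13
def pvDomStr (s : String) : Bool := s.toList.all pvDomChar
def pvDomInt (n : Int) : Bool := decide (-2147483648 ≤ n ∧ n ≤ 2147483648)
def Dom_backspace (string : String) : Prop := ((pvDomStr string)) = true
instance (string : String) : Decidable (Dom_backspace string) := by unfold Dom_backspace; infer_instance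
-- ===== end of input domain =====

-- B replaces A's backward scan with a deletion counter by a forward pass with an explicit stack (alternative decomposition, same cost).


-- ===== PORT A =====
-- literal port of A: iterate over string[::-1] with a pending-backspace counter `back`,
-- appending kept symbols (as one-char strings) to `result`
def backspace (string : String) : List String :=
  (string.toList.reverse.foldl
    (fun (st : Nat × List String) symbol =>
      if symbol = '#' then (st.1 + 1, st.2)
      else if st.1 = 0 then (st.1, st.2 ++ [String.singleton symbol])
      else (st.1 - 1, st.2))
    (0, [])).2

-- ===== PORT B =====
-- literal port of B: forward pass with a stack; '#' pops (when nonempty), otherwise push; return stack[::-1]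
def backspace_alt (string : String) : List String :=
  (string.toList.foldl
    (fun (stack : List String) ch =>
      if ch = '#' then (if stack ≠ [] then stack.dropLast else stack)
      else stack ++ [String.singleton ch])
    []).reverse

-- ===== PRECONDITION & SPEC =====
def Spec_backspace (string : String) (out : List String) : Prop := out = backspace_alt string
instance (string : String) (out : List String) : Decidable (Spec_backspace string out) := by unfold Spec_backspace; infer_instance

-- ===== CLAIM (what is proved, stated in full; the proofs are below) =====
def Claim_equal_backspace : Prop := ∀ (string : String), Dom_backspace string → Spec_backspace string (backspace string)

-- ===== LEMMAS AND PROOFS =====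

-- reference recursion: the kept symbols, in A's (reversed-input) output order
def pvProc : Nat → List Char → List String
  | _, [] => []
  | b, c :: t =>
    if c = '#' then pvProc (b + 1) t
    else if b = 0 then String.singleton c :: pvProc 0 t
    else pvProc (b - 1) t

-- A's foldl accumulates pvProc
theorem pvA_foldl (l : List Char) : ∀ (b : Nat) (res : List String),
    (l.foldl
      (fun (st : Nat × List String) symbol =>
        if symbol = '#' then (st.1 + 1, st.2)
        else if st.1 = 0 then (st.1, st.2 ++ [String.singleton symbol])
        else (st.1 - 1, st.2))
      (b, res)).2 = res ++ pvProc b l := by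
  induction l with
  | nil => intro b res; simp [pvProc]
  | cons c t ih =>
    intro b res
    by_cases hc : c = '#'
    · simp [hc, pvProc, ih]
    · by_cases hb : b = 0
      · simp [hc, hb, pvProc, ih]
      · simp [hc, hb, pvProc, ih]

-- skipping one more kept symbol drops the head
theorem pvProc_succ (t : List Char) : ∀ b : Nat, pvProc (b + 1) t = (pvProc b t).tail := by
  induction t with
  | nil => intro b; simp [pvProc]
  | cons c t' ih =>
    intro b
    by_cases hc : c = '#'
    · simp [hc, pvProc, ih]
    · by_cases hb : b = 0
      · simp [hc, hb, pvProc]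
      · have h1 : b - 1 + 1 = b := Nat.succ_pred_eq_of_pos (Nat.pos_of_ne_zero hb)
        simp only [pvProc, if_neg hc, if_neg hb, Nat.add_sub_cancel]
        conv_lhs => rw [← h1]
        exact ih (b - 1)

theorem pvDropLast_reverse {α : Type} (l : List α) : l.dropLast.reverse = l.reverse.tail := by
  induction l using List.reverseRecOn with
  | nil => simp
  | append_singleton ys y ih => simp

def pvBstep (stack : List String) (ch : Char) : List String :=
  if ch = '#' then (if stack ≠ [] then stack.dropLast else stack)
  else stack ++ [String.singleton ch]

-- B's stack (built over the reversed list) reversed is pvProc 0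
theorem pvB_stack (m : List Char) :
    (m.reverse.foldl pvBstep []).reverse = pvProc 0 m := by
  induction m with
  | nil => simp [pvProc]
  | cons c t ih =>
    have hstep : (c :: t).reverse.foldl pvBstep [] = pvBstep (t.reverse.foldl pvBstep []) c := by
      simp [List.foldl_append]
    rw [hstep]
    by_cases hc : c = '#'
    · by_cases he : t.reverse.foldl pvBstep [] = []
      · simp [pvBstep, hc, pvProc, pvProc_succ, ← ih, he]
      · simp only [pvBstep, hc, if_pos, he, ne_eq, not_false_eq_true]
        rw [pvDropLast_reverse, ih]
        simp [pvProc, pvProc_succ]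
    · simp [pvBstep, hc, pvProc, ← ih]

-- ===== VERDICT (by name: the statement is the Claim_ definition above) =====
theorem backspace_spec : Claim_equal_backspace := by
  intro s _
  show backspace s = backspace_alt s
  unfold backspace backspace_alt
  rw [pvA_foldl, List.nil_append]
  have hfun : (fun (stack : List String) ch =>
      if ch = '#' then (if stack ≠ [] then stack.dropLast else stack)
      else stack ++ [String.singleton ch]) = pvBstep := rfl
  rw [hfun]
  have h := pvB_stack s.toList.reverse
  rw [List.reverse_reverse] at h
  exact h.symm
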